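-- pv_equiv track=rewrite | github.com/nivedithan97/python-to-html | pretty.py | countNumOfRepConst
-- ===== SOURCE A (Python) =====
-- def countNumOfRepConst(lst_tk):
--     # count repetitions
--     def countdicrep(dic):
--         counter = 0
--         for entry in dic:
--             if dic[entry] >= 2:
--                 counter += 1
--         return counter
--
--     # constants are numbers and strings
--     dic1 = {}
--     dic2 = {}
--     for token in lst_tk:
--         # type = 2 is NUMBER
--         if token[0] == 2:
--             if token[1] not in dic1:
--                 dic1[token[1]] = 1
--             else:
--                 dic1[token[1]] += 1
--
--     for token in lst_tk:
--         # type = 3 is STRING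
--         if token[0] == 3:
--             if token[1] not in dic2:
--                 dic2[token[1]] = 1
--             else:
--                 dic2[token[1]] += 1
--
--     maxcount = countdicrep(dic1)
--     maxcount += countdicrep(dic2)
--     return maxcount
-- ===== SOURCE B (Python) =====
-- def countNumOfRepConst(lst_tk):
--     # sort each kind's constant values, then count runs of equal adjacent
--     # values whose length is at least two (one run per repeated constant)
--     def repeated_runs(vals):
--         count = 0
--         prev = None
--         runlen = 0
--         for v in vals:
--             if runlen > 0 and prev == v:
--                 runlen += 1
--             else:
--                 if runlen >= 2:
--                     count += 1
--                 prev = v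
--                 runlen = 1
--         if runlen >= 2:
--             count += 1
--         return count
--
--     return (repeated_runs(sorted(tok[1] for tok in lst_tk if tok[0] == 2))
--             + repeated_runs(sorted(tok[1] for tok in lst_tk if tok[0] == 3)))
-- ===== Notes on version B (the rewrite author's own statement) =====
-- stated objective: alternative
-- what changed: Replaces A's two hash-count dicts plus a dict-scanning helper with a sort-then-scan algorithm: each kind's constant values are sorted so equal values become adjacent, and a single linear scan counts the runs of length at least two.
import Mathlib
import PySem

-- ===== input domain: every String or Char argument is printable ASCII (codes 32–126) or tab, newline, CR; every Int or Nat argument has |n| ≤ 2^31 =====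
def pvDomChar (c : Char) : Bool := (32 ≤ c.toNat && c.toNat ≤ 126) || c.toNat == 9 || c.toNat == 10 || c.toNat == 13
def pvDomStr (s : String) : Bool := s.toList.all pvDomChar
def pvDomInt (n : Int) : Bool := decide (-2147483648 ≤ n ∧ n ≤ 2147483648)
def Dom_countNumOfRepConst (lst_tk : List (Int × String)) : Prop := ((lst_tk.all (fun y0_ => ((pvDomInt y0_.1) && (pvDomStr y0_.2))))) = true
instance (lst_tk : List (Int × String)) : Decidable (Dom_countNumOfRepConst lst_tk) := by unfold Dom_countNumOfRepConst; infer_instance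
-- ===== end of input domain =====

-- B replaces A's two hash-count dicts and dict-scanning helper by sort-then-scan:
-- sort each kind's values so equal ones are adjacent, count runs of length ≥ 2 (alternative).

-- ===== PORT A =====
-- helper countdicrep: iterates the dict's keys; `dic[entry]` always succeeds since entry is a key,
-- so `getD entry 0` is exact there.
def countdicrep (dic : PySem.Dict String Int) : Int :=
  (PySem.Dict.keys dic).foldl
    (fun counter entry => if PySem.Dict.getD dic entry 0 ≥ 2 then counter + 1 else counter) 0

def countNumOfRepConst (lst_tk : List (Int × String)) : Int :=
  let dic1 := lst_tk.foldl (fun d token =>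
      if token.1 == 2 then
        (if !(PySem.Dict.contains d token.2) then PySem.Dict.insert d token.2 1
         else PySem.Dict.insert d token.2 (PySem.Dict.getD d token.2 0 + 1))
      else d) PySem.Dict.empty
  let dic2 := lst_tk.foldl (fun d token =>
      if token.1 == 3 then
        (if !(PySem.Dict.contains d token.2) then PySem.Dict.insert d token.2 1
         else PySem.Dict.insert d token.2 (PySem.Dict.getD d token.2 0 + 1))
      else d) PySem.Dict.empty
  let maxcount := countdicrep dic1
  let maxcount := maxcount + countdicrep dic2
  maxcount

-- ===== PORT B =====
-- the `for v in vals` scan of repeated_runs: state = (count, prev, runlen); prev starts as None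
def runStep (st : Int × Option String × Int) (v : String) : Int × Option String × Int :=
  if 0 < st.2.2 ∧ st.2.1 = some v then (st.1, st.2.1, st.2.2 + 1)
  else ((if st.2.2 ≥ 2 then st.1 + 1 else st.1), some v, 1)

def repeatedRuns (vals : List String) : Int :=
  let fin := vals.foldl runStep (0, none, 0)
  if fin.2.2 ≥ 2 then fin.1 + 1 else fin.1

def countNumOfRepConst_alt (lst_tk : List (Int × String)) : Int :=
  repeatedRuns (PySem.List.sorted ((lst_tk.filter (fun tok => tok.1 == 2)).map (·.2)) (fun v => v) false)
  + repeatedRuns (PySem.List.sorted ((lst_tk.filter (fun tok => tok.1 == 3)).map (·.2)) (fun v => v) false)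

-- ===== PRECONDITION & SPEC =====
def Spec_countNumOfRepConst (lst_tk : List (Int × String)) (out : Int) : Prop := out = countNumOfRepConst_alt lst_tk
instance (lst_tk : List (Int × String)) (out : Int) : Decidable (Spec_countNumOfRepConst lst_tk out) := by unfold Spec_countNumOfRepConst; infer_instance

-- ===== CLAIM (what is proved, stated in full; the proofs are below) =====
def Claim_equal_countNumOfRepConst : Prop := ∀ (lst_tk : List (Int × String)), Dom_countNumOfRepConst lst_tk → Spec_countNumOfRepConst lst_tk (countNumOfRepConst lst_tk)

-- ===== LEMMAS AND PROOFS =====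

-- A's guarded if-contains loop is the plain counter-insert loop over the filtered values.
lemma dic_aux (t : Int) (lst : List (Int × String)) : ∀ (d : PySem.Dict String Int),
    lst.foldl (fun d token =>
      if token.1 == t then
        (if !(PySem.Dict.contains d token.2) then PySem.Dict.insert d token.2 1
         else PySem.Dict.insert d token.2 (PySem.Dict.getD d token.2 0 + 1))
      else d) d
    = ((lst.filter (fun p => p.1 == t)).map (·.2)).foldl (fun d x => d.insert x (d.getD x 0 + 1)) d := by
  induction lst with
  | nil => intro d; rfl
  | cons x xs ih =>
    intro d
    by_cases hx : x.1 == t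
    · simp only [List.foldl_cons, List.filter_cons, hx, List.map_cons, if_pos]
      rw [ih]
      congr 1
      by_cases hc : PySem.Dict.contains d x.2
      · simp [hc]
      · simp only [Bool.not_eq_true] at hc
        simp [hc, PySem.Dict.getD_of_not_contains d 0 hc]
    · simp only [List.foldl_cons, List.filter_cons, hx, Bool.false_eq_true, if_false]
      exact ih d

lemma dic_eq_counter (t : Int) (lst : List (Int × String)) :
    lst.foldl (fun d token =>
      if token.1 == t then
        (if !(PySem.Dict.contains d token.2) then PySem.Dict.insert d token.2 1
         else PySem.Dict.insert d token.2 (PySem.Dict.getD d token.2 0 + 1))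
      else d) PySem.Dict.empty
    = PySem.Dict.counter ((lst.filter (fun p => p.1 == t)).map (·.2)) := by
  rw [dic_aux, PySem.Dict.foldl_insert_getD_add_one_eq_counter]

-- countdicrep over Counter(xs) counts the distinct values occurring at least twice.
lemma countdicrep_counter (xs : List String) :
    countdicrep (PySem.Dict.counter xs)
      = ((PySem.List.dedup xs).countP (fun v => decide (2 ≤ xs.count v)) : Int) := by
  unfold countdicrep
  rw [PySem.Dict.keys_counter, ← PySem.List.dedup_eq_ofList]
  have hfun : (fun (counter : Int) entry =>
      if PySem.Dict.getD (PySem.Dict.counter xs) entry 0 ≥ 2 then counter + 1 else counter)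
      = (fun counter entry => if (fun v => decide (2 ≤ xs.count v)) entry = true then counter + 1 else counter) := by
    funext c e
    rw [PySem.Dict.getD_counter]
    by_cases h : 2 ≤ xs.count e
    · simp [h, show (2:Int) ≤ (xs.count e : Int) by exact_mod_cast h]
    · have : ¬ ((2:Int) ≤ (xs.count e : Int)) := by exact_mod_cast h
      simp [h, this]
  rw [hfun, PySem.List.foldl_count_if]
  simp

-- distinct-with-multiplicity≥2 count, the value both sides compute per kind
def dupCount (xs : List String) : Nat :=
  (PySem.List.dedup xs).countP (fun v => decide (2 ≤ xs.count v))

lemma countP_dedup_cons (x : String) (l : List String) (q : String → Bool) :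
    (PySem.List.dedup (x :: l)).countP q
      = (if q x then 1 else 0) + (PySem.List.dedup l).countP (fun w => decide (w ≠ x) && q w) := by
  have hperm : (PySem.List.dedup (x :: l)).Perm (x :: (PySem.List.dedup l).filter (fun w => decide (w ≠ x))) := by
    apply (List.perm_ext_iff_of_nodup (PySem.List.nodup_dedup _) _).mpr
    · intro w
      simp only [PySem.List.mem_dedup, List.mem_cons, List.mem_filter, decide_eq_true_eq]
      constructor
      · rintro (rfl | hw)
        · exact Or.inl rfl
        · by_cases hwx : w = x
          · exact Or.inl hwx
          · exact Or.inr ⟨hw, hwx⟩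
      · rintro (rfl | ⟨hw, _⟩)
        · exact Or.inl rfl
        · exact Or.inr hw
    · refine List.Nodup.cons ?_ ((PySem.List.nodup_dedup l).filter _)
      intro hx
      exact (by simpa using (List.mem_filter.mp hx).2 : x ≠ x) rfl
  rw [hperm.countP_eq]
  simp only [List.countP_cons, List.countP_filter]
  by_cases hqx : q x = true
  · simp [hqx, Nat.add_comm, Bool.and_comm]
  · simp only [Bool.not_eq_true] at hqx
    simp [hqx, Bool.and_comm]

-- dupCount is invariant under permutation
lemma dupCount_perm {xs ys : List String} (h : xs.Perm ys) : dupCount xs = dupCount ys := by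
  unfold dupCount
  have hd : (PySem.List.dedup xs).Perm (PySem.List.dedup ys) := by
    apply (List.perm_ext_iff_of_nodup (PySem.List.nodup_dedup _) (PySem.List.nodup_dedup _)).mpr
    intro w
    simp only [PySem.List.mem_dedup]
    exact h.mem_iff
  rw [hd.countP_eq]
  apply List.countP_congr
  intro w _
  simp [h.count_eq]

-- core scan invariant: mid-run state (c, some p, k) on a sorted remainder all ≥ p
lemma scan_run (s : List String) (hs : s.Pairwise (· ≤ ·)) :
    ∀ (c : Int) (p : String) (k : Int), 1 ≤ k → (∀ w ∈ s, p ≤ w) →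
    (let fin := s.foldl runStep (c, some p, k)
     if fin.2.2 ≥ 2 then fin.1 + 1 else fin.1)
      = (if 2 ≤ k + (s.count p : Int) then c + 1 else c)
        + ((PySem.List.dedup s).countP (fun w => decide (w ≠ p) && decide (2 ≤ s.count w)) : Int) := by
  induction s with
  | nil => intro c p k hk _; simp
  | cons v rest ih =>
    intro c p k hk hle
    have hrest : rest.Pairwise (· ≤ ·) := hs.tail
    have hvle : ∀ w ∈ rest, v ≤ w := fun w hw => List.rel_of_pairwise_cons hs hw
    by_cases hvp : v = p
    · subst hvp
      have hstep : runStep (c, some v, k) v = (c, some v, k + 1) := by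
        simp [runStep, show 0 < k by omega]
      rw [List.foldl_cons, hstep, ih hrest c v (k + 1) (by omega) hvle]
      rw [countP_dedup_cons]
      have hq : (fun w => decide (w ≠ v) && (decide (w ≠ v) && decide (2 ≤ (v :: rest).count w)))
          = (fun w => decide (w ≠ v) && decide (2 ≤ rest.count w)) := by
        funext w
        by_cases hwv : w = v
        · simp [hwv]
        · have hvw : ¬ v = w := fun h => hwv h.symm
          simp [hwv, hvw]
      rw [hq]
      have hcv : ((v :: rest).count v : Int) = (rest.count v : Int) + 1 := by
        simp
      simp only [ne_eq, not_true_eq_false, decide_false, Bool.false_and, Bool.false_eq_true,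
        if_false]
      rw [hcv]
      have : k + 1 + (rest.count v : Int) = k + ((rest.count v : Int) + 1) := by ring
      rw [this]
      simp
    · -- v ≠ p: p does not occur in v :: rest (all its elements are ≥ v > p)
      have hpv : p < v := lt_of_le_of_ne (hle v (by simp)) (fun h => hvp h.symm)
      have hnp : ∀ w ∈ (v :: rest), w ≠ p := by
        intro w hw
        rcases List.mem_cons.mp hw with rfl | hw
        · exact fun h => hvp h
        · exact fun h => absurd (lt_of_lt_of_le hpv (hvle w hw)) (by rw [h]; exact lt_irrefl p)
      have hcount0 : (v :: rest).count p = 0 := by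
        rw [List.count_eq_zero]
        intro hp
        exact hnp p hp rfl
      have hstep : runStep (c, some p, k) v = ((if k ≥ 2 then c + 1 else c), some v, 1) := by
        have : ¬ (some p = some v) := fun h => hvp (Option.some.inj h).symm
        simp [runStep, this]
      rw [List.foldl_cons, hstep,
        ih hrest (if k ≥ 2 then c + 1 else c) v 1 le_rfl hvle]
      rw [hcount0, countP_dedup_cons]
      have hq2 : (PySem.List.dedup rest).countP
            (fun w => decide (w ≠ v) && (decide (w ≠ p) && decide (2 ≤ (v :: rest).count w)))
          = (PySem.List.dedup rest).countP (fun w => decide (w ≠ v) && decide (2 ≤ rest.count w)) := by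
        apply List.countP_congr
        intro w hw
        have hwp : w ≠ p := hnp w (List.mem_cons_of_mem v ((PySem.List.mem_dedup _ _).mp hw))
        by_cases hwv : w = v
        · simp [hwv]
        · have hvw : ¬ v = w := fun h => hwv h.symm
          simp [hwv, hvw, hwp]
      have hqv : (decide (v ≠ p) && decide (2 ≤ (v :: rest).count v)) = decide (2 ≤ rest.count v + 1) := by
        simp [hvp]
      rw [hq2, hqv]
      simp only [decide_eq_true_eq]
      push_cast
      split_ifs <;> omega

-- the whole scan on a sorted list computes dupCount
lemma repeatedRuns_sorted (s : List String) (hs : s.Pairwise (· ≤ ·)) :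
    repeatedRuns s = (dupCount s : Int) := by
  unfold repeatedRuns dupCount
  cases s with
  | nil => simp
  | cons v rest =>
    have hrest : rest.Pairwise (· ≤ ·) := hs.tail
    have hvle : ∀ w ∈ rest, v ≤ w := fun w hw => List.rel_of_pairwise_cons hs hw
    have hstep : runStep (0, none, 0) v = (0, some v, 1) := by simp [runStep]
    simp only [List.foldl_cons, hstep]
    have hmain := scan_run rest hrest 0 v 1 le_rfl hvle
    simp only at hmain
    rw [hmain, countP_dedup_cons]
    have hq : (PySem.List.dedup rest).countP
          (fun w => decide (w ≠ v) && decide (2 ≤ (v :: rest).count w))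
        = (PySem.List.dedup rest).countP (fun w => decide (w ≠ v) && decide (2 ≤ rest.count w)) := by
      apply List.countP_congr
      intro w _
      by_cases hwv : w = v
      · simp [hwv]
      · have hvw : ¬ v = w := fun h => hwv h.symm
        simp [hwv, hvw]
    rw [hq]
    have hcv : (if decide (2 ≤ (v :: rest).count v) = true then (1:Nat) else 0)
        = (if 2 ≤ 1 + (rest.count v : Int) then (1:Nat) else 0) := by
      simp only [List.count_cons_self]
      by_cases h : 2 ≤ rest.count v + 1
      · simp [h, show (2:Int) ≤ 1 + (rest.count v : Int) by omega]
      · simp [h, show ¬ ((2:Int) ≤ 1 + (rest.count v : Int)) by omega]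
    rw [hcv]
    push_cast
    split_ifs <;> omega

-- per kind: B's sort-then-scan equals dupCount of the unsorted values
lemma repeatedRuns_eq_dupCount (xs : List String) :
    repeatedRuns (PySem.List.sorted xs (fun v => v) false) = (dupCount xs : Int) := by
  rw [repeatedRuns_sorted _ (by simpa using PySem.List.sorted_pairwise xs (fun v => v)),
    dupCount_perm (PySem.List.sorted_perm xs (fun v => v) false)]

-- ===== VERDICT (by name: the statement is the Claim_ definition above) =====
theorem countNumOfRepConst_spec : Claim_equal_countNumOfRepConst := by
  intro lst _
  unfold Spec_countNumOfRepConst countNumOfRepConst countNumOfRepConst_alt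
  simp only []
  rw [dic_eq_counter 2 lst, dic_eq_counter 3 lst, countdicrep_counter, countdicrep_counter,
    repeatedRuns_eq_dupCount, repeatedRuns_eq_dupCount]
  rfl
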